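-- pv_equiv track=rewrite | github.com/MandalaArchana/TRAVEL-PLANNER | app.py | get_current_weather
-- ===== SOURCE A (Python) =====
-- def get_current_weather(city: str) -> dict:
--     """Mock weather API - returns realistic weather data by city."""
--     city_lower = city.lower()
--
--     # Realistic weather patterns by city/keywords
--     if any(word in city_lower for word in ['helsinki', 'snow', 'cold']):
--         return {"location": city, "condition": "snowy", "temp": "-5°C"}
--     elif any(word in city_lower for word in ['miami', 'dubai', 'sunny', 'hot']):
--         return {"location": city, "condition": "sunny", "temp": "28°C"}
--     elif any(word in city_lower for word in ['london', 'rain', 'seattle']):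
--         return {"location": city, "condition": "rainy", "temp": "12°C"}
--     else:
--         return {"location": city, "condition": "clear", "temp": "20°C"}
-- ===== SOURCE B (Python) =====
-- # Flattened keyword -> priority map; one pass keeps the minimum matched priority.
-- KEYWORD_PRIORITY = {
--     'helsinki': 0, 'snow': 0, 'cold': 0,
--     'miami': 1, 'dubai': 1, 'sunny': 1, 'hot': 1,
--     'london': 2, 'rain': 2, 'seattle': 2,
-- }
--
-- OUTCOMES = [("snowy", "-5°C"), ("sunny", "28°C"), ("rainy", "12°C"), ("clear", "20°C")]
--
-- def get_current_weather(city: str) -> dict: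
--     """Mock weather API - returns realistic weather data by city."""
--     city_lower = city.lower()
--     best = 3  # priority of the default outcome
--     for word, pri in KEYWORD_PRIORITY.items():
--         if pri < best and word in city_lower:
--             best = pri
--     condition, temp = OUTCOMES[best]
--     return {"location": city, "condition": condition, "temp": temp}
-- ===== Notes on version B (the rewrite author's own statement) =====
-- stated objective: alternative
-- what changed: Replaces the ordered if/elif group checks with a single pass over a flattened keyword->priority map that keeps the minimum matched priority, then indexes a fixed outcomes table (default priority 3).
import Mathlib
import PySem

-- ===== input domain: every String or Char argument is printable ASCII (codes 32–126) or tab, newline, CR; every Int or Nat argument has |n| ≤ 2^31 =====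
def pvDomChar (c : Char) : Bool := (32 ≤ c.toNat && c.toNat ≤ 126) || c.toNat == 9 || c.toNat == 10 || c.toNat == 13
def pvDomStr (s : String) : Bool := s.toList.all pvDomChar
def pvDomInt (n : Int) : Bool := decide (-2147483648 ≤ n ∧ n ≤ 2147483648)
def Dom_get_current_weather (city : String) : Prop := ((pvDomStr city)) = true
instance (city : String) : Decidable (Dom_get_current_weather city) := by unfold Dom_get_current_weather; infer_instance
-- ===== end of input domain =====

-- B replaces A's if/elif keyword-group chain by one pass over a flattened keyword->priority map,
-- keeping the minimum matched priority and indexing an outcomes table (alternative; same cost).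


-- ===== PORT A =====
def get_current_weather (city : String) : List (String × String) :=
  let city_lower := PySem.Str.lower city
  if ["helsinki", "snow", "cold"].any (fun word => PySem.Str.isIn word city_lower) then
    [("location", city), ("condition", "snowy"), ("temp", "-5°C")]
  else if ["miami", "dubai", "sunny", "hot"].any (fun word => PySem.Str.isIn word city_lower) then
    [("location", city), ("condition", "sunny"), ("temp", "28°C")]
  else if ["london", "rain", "seattle"].any (fun word => PySem.Str.isIn word city_lower) then
    [("location", city), ("condition", "rainy"), ("temp", "12°C")]
  else
    [("location", city), ("condition", "clear"), ("temp", "20°C")]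

-- ===== PORT B =====
-- B: flattened keyword -> priority map; one pass keeps the minimum matched priority.
def keywordPriority : List (String × Nat) :=
  [("helsinki", 0), ("snow", 0), ("cold", 0),
   ("miami", 1), ("dubai", 1), ("sunny", 1), ("hot", 1),
   ("london", 2), ("rain", 2), ("seattle", 2)]

def weatherOutcomes : List (String × String) :=
  [("snowy", "-5°C"), ("sunny", "28°C"), ("rainy", "12°C"), ("clear", "20°C")]

def get_current_weather_alt (city : String) : List (String × String) :=
  let city_lower := PySem.Str.lower city
  let best := keywordPriority.foldl
    (fun best wp => if wp.2 < best && PySem.Str.isIn wp.1 city_lower then wp.2 else best) 3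
  let ct := weatherOutcomes.getD best ("clear", "20°C")
  [("location", city), ("condition", ct.1), ("temp", ct.2)]

-- ===== PRECONDITION & SPEC =====
def Spec_get_current_weather (city : String) (out : List (String × String)) : Prop := out = get_current_weather_alt city
instance (city : String) (out : List (String × String)) : Decidable (Spec_get_current_weather city out) := by unfold Spec_get_current_weather; infer_instance

-- ===== CLAIM (what is proved, stated in full; the proofs are below) =====
def Claim_equal_get_current_weather : Prop := ∀ (city : String), Dom_get_current_weather city → Spec_get_current_weather city (get_current_weather city)

-- ===== LEMMAS AND PROOFS =====

-- ===== VERDICT (by name: the statement is the Claim_ definition above) =====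
theorem get_current_weather_spec : Claim_equal_get_current_weather := by
  intro city _
  unfold Spec_get_current_weather get_current_weather get_current_weather_alt keywordPriority weatherOutcomes
  by_cases h1 : PySem.Chars.isIn ['h', 'e', 'l', 's', 'i', 'n', 'k', 'i'] (PySem.Chars.lower city.toList) = true
  · simp [List.foldl, h1]
  · by_cases h2 : PySem.Chars.isIn ['s', 'n', 'o', 'w'] (PySem.Chars.lower city.toList) = true
    · simp [List.foldl, h1, h2]
    · by_cases h3 : PySem.Chars.isIn ['c', 'o', 'l', 'd'] (PySem.Chars.lower city.toList) = true
      · simp [List.foldl, h1, h2, h3]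
      · by_cases h4 : PySem.Chars.isIn ['m', 'i', 'a', 'm', 'i'] (PySem.Chars.lower city.toList) = true
        · simp [List.foldl, h1, h2, h3, h4]
        · by_cases h5 : PySem.Chars.isIn ['d', 'u', 'b', 'a', 'i'] (PySem.Chars.lower city.toList) = true
          · simp [List.foldl, h1, h2, h3, h4, h5]
          · by_cases h6 : PySem.Chars.isIn ['s', 'u', 'n', 'n', 'y'] (PySem.Chars.lower city.toList) = true
            · simp [List.foldl, h1, h2, h3, h4, h5, h6]
            · by_cases h7 : PySem.Chars.isIn ['h', 'o', 't'] (PySem.Chars.lower city.toList) = true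
              · simp [List.foldl, h1, h2, h3, h4, h5, h6, h7]
              · by_cases h8 : PySem.Chars.isIn ['l', 'o', 'n', 'd', 'o', 'n'] (PySem.Chars.lower city.toList) = true
                · simp [List.foldl, h1, h2, h3, h4, h5, h6, h7, h8]
                · by_cases h9 : PySem.Chars.isIn ['r', 'a', 'i', 'n'] (PySem.Chars.lower city.toList) = true
                  · simp [List.foldl, h1, h2, h3, h4, h5, h6, h7, h8, h9]
                  · by_cases h10 : PySem.Chars.isIn ['s', 'e', 'a', 't', 't', 'l', 'e'] (PySem.Chars.lower city.toList) = true
                    · simp [List.foldl, h1, h2, h3, h4, h5, h6, h7, h8, h9, h10]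
                    · simp [List.foldl, h1, h2, h3, h4, h5, h6, h7, h8, h9, h10]
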